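-- pv_equiv track=rewrite | github.com/jsw6872/TIL | coding_test/programmers/핸드폰_번호_가리기/my_solution.py | solution
-- ===== SOURCE A (Python) =====
-- def solution(phone_number):
--     answer = ''
--     for idx, i in enumerate(phone_number):
--         if idx > (len(phone_number)-5):
--             answer += i
--         else :
--             answer += '*'
--     return answer
-- ===== SOURCE B (Python) =====
-- def solution(phone_number):
--     return '*' * (len(phone_number) - 4) + phone_number[-4:]
-- ===== Notes on version B (the rewrite author's own statement) =====
-- stated objective: faster
-- what changed: Replaces the per-character enumerate loop with direct arithmetic construction: a star block of length len-4 concatenated with the last-four slice, relying on non-positive repetition being empty and on slice clamping.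
import Mathlib
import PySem

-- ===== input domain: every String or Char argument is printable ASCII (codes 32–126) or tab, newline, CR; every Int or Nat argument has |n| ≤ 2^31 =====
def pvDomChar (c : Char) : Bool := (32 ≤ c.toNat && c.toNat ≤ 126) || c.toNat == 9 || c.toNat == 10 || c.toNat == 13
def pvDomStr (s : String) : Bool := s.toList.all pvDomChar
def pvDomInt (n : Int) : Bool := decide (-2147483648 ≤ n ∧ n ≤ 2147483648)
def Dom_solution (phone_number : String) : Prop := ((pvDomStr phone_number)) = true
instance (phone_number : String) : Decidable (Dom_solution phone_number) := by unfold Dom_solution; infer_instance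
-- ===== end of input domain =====

-- ===== PORT A =====
-- literal port of A: enumerate loop appending the char when idx > len-5, else '*'
def solution (phone_number : String) : String :=
  String.ofList ((PySem.List.enumerate phone_number.toList 0).foldl
    (fun acc p => acc ++ (if p.1 > PySem.Str.len phone_number - 5 then [p.2] else ['*'])) [])

-- ===== PORT B =====
-- B: '*' * (len-4) + phone_number[-4:] (more idiomatic; no per-character loop)
def solution_alt (phone_number : String) : String :=
  String.ofList (PySem.List.pyRepeat ['*'] (PySem.Str.len phone_number - 4) ++
    PySem.Chars.slice phone_number.toList (some (-4)) none)

-- ===== PRECONDITION & SPEC =====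
def Spec_solution (phone_number : String) (out : String) : Prop := out = solution_alt phone_number
instance (phone_number : String) (out : String) : Decidable (Spec_solution phone_number out) := by unfold Spec_solution; infer_instance

-- ===== CLAIM (what is proved, stated in full; the proofs are below) =====
def Claim_equal_solution : Prop := ∀ (phone_number : String), Dom_solution phone_number → Spec_solution phone_number (solution phone_number)

-- ===== LEMMAS AND PROOFS =====

-- ===== VERDICT (by name: the statement is the Claim_ definition above) =====
lemma solution_key (l : List Char) :
    ((PySem.List.enumerate l 0).flatMap
      (fun p => if p.1 > (l.length : Int) - 5 then [p.2] else ['*'])) =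
    List.replicate (((l.length : Int) - 4).toNat) '*' ++ l.drop (l.length - 4) := by
  have hmap : ((PySem.List.enumerate l 0).flatMap
      (fun p => if p.1 > (l.length : Int) - 5 then [p.2] else ['*'])) =
      (PySem.List.enumerate l 0).map
        (fun p => if p.1 > (l.length : Int) - 5 then p.2 else '*') := by
    rw [← List.flatMap_singleton' ((PySem.List.enumerate l 0).map _), List.flatMap_map]
    congr 1; funext p; split <;> simp
  rw [hmap]
  apply List.ext_getElem
  · simp [PySem.List.length_enumerate]; omega
  · intro i h1 h2
    have hi : i < l.length := by simpa [PySem.List.length_enumerate] using h1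
    rw [List.getElem_map, PySem.List.getElem_enumerate]
    by_cases hc : i < l.length - 4
    · have hlen : i < (List.replicate (((l.length : Int) - 4).toNat) '*').length := by
        simp; omega
      rw [List.getElem_append_left hlen]
      have hneg : ¬ ((0 : Int) + (i : Int) > (l.length : Int) - 5) := by omega
      rw [if_neg hneg, List.getElem_replicate]
    · have hlen' : (List.replicate (((l.length : Int) - 4).toNat) '*').length ≤ i := by
        simp; omega
      rw [List.getElem_append_right hlen']
      have hpos : ((0 : Int) + (i : Int) > (l.length : Int) - 5) := by omega
      rw [if_pos hpos, List.getElem_drop]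
      have hidx : l.length - 4 + (i - (List.replicate (((l.length : Int) - 4).toNat) '*').length) = i := by
        simp only [List.length_replicate]; omega
      simp only [hidx]

theorem solution_spec : Claim_equal_solution := by
  intro s _
  unfold Spec_solution solution solution_alt
  rw [PySem.List.foldl_append_eq_flatMap]
  rw [PySem.List.pyRepeat_singleton,
      PySem.Chars.slice_eq_listSlice,
      PySem.List.slice_from_neg_ofNat s.toList 4 (by omega)]
  simp only [PySem.Str.len_eq, List.nil_append]
  exact congrArg String.ofList (solution_key s.toList)
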